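-- pv_equiv track=rewrite | github.com/trace86/jhu-aai | AlphaToe/mapping.py | antidiagonal_right_search
-- ===== SOURCE A (Python) =====
-- from typing import List, Tuple
--
-- def antidiagonal_right_search(i: int, j: int, matrix: List[List[int]], num_neighbors: int, symbol: int) -> bool:
--     min_i = 0
--     min_j = 0
--     max_i = len(matrix) - 1
--     max_j = len(matrix[0]) - 1
--
--     xs = []
--     for n in range(1, num_neighbors + 1):
--         _i = i - n
--         _j = j + n
--         if _i >= min_i and _j >= min_j and _i <= max_i and _j <= max_j:
--             xs.append(matrix[_i][_j])
--     if len(xs) != num_neighbors: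
--         return False
--     return all(item == symbol for item in xs)
-- ===== SOURCE B (Python) =====
-- from typing import List
--
-- def antidiagonal_right_search(i: int, j: int, matrix: List[List[int]], num_neighbors: int, symbol: int) -> bool:
--     max_i = len(matrix) - 1
--     max_j = len(matrix[0]) - 1
--     for n in range(1, num_neighbors + 1):
--         _i = i - n
--         _j = j + n
--         if _i < 0 or _j < 0 or _i > max_i or _j > max_j:
--             return False
--         if matrix[_i][_j] != symbol:
--             return False
--     return True
-- ===== Notes on version B (the rewrite author's own statement) =====
-- stated objective: simpler
-- what changed: Fused A's build-filtered-list / compare-length / all() pipeline into a single scan over the antidiagonal that returns False at the first out-of-bounds or mismatching neighbor.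
-- outside the precondition, e.g. on antidiagonal_right_search(1, 0, [[5]], -1, 5): A returns False, B returns True
import Mathlib
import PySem

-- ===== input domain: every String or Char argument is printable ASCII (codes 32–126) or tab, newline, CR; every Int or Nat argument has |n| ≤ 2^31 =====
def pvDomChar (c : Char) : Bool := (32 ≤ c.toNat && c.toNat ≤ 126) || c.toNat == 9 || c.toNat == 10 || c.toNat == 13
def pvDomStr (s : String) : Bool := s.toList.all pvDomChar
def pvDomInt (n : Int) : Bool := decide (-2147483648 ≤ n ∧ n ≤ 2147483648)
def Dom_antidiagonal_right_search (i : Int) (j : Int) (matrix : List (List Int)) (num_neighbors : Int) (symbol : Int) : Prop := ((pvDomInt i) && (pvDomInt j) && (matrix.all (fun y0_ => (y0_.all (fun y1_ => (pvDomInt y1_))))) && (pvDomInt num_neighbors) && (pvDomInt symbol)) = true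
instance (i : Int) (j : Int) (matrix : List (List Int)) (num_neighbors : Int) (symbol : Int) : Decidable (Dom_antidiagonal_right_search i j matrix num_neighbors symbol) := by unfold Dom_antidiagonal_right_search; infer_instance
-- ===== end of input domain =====

-- B replaces A's build-list / compare-length / all() pipeline with a single early-exit scan (objective: simpler).

-- ===== PORT A =====
def antidiagonal_right_search (i : Int) (j : Int) (matrix : List (List Int)) (num_neighbors : Int) (symbol : Int) : Bool :=
  -- len(matrix[0]): Python raises IndexError on empty matrix; excluded by Pre_ (the .getD [] there is never the real value)
  let row0 : List Int := (PySem.List.pyGet? matrix 0).getD []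
  let max_i : Int := (matrix.length : Int) - 1
  let max_j : Int := (row0.length : Int) - 1
  let xs : List Int :=
    (PySem.List.pyRange 1 (num_neighbors + 1) 1).foldl
      (fun acc n =>
        if 0 ≤ i - n ∧ 0 ≤ j + n ∧ i - n ≤ max_i ∧ j + n ≤ max_j then
          -- matrix[_i][_j]; the .getD defaults are only reached where Python raises (ragged rows, excluded by Pre_)
          acc ++ [(PySem.List.pyGet? ((PySem.List.pyGet? matrix (i - n)).getD []) (j + n)).getD 0]
        else acc) []
  if (xs.length : Int) ≠ num_neighbors then false
  else xs.all (fun item => item == symbol)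

-- ===== PORT B =====
-- early-exit loop body of Source B, recursing over the remaining range values
def pvAltGo (i : Int) (j : Int) (matrix : List (List Int)) (symbol : Int) (max_i : Int) (max_j : Int) : List Int → Bool
  | [] => true
  | n :: rest =>
    if i - n < 0 ∨ j + n < 0 ∨ max_i < i - n ∨ max_j < j + n then false
    else if ¬ ((PySem.List.pyGet? ((PySem.List.pyGet? matrix (i - n)).getD []) (j + n)).getD 0 = symbol) then false
    else pvAltGo i j matrix symbol max_i max_j rest

def antidiagonal_right_search_alt (i : Int) (j : Int) (matrix : List (List Int)) (num_neighbors : Int) (symbol : Int) : Bool :=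
  -- len(matrix[0]) raises on the empty matrix in Source B too; excluded by Pre_
  let row0 : List Int := (PySem.List.pyGet? matrix 0).getD []
  pvAltGo i j matrix symbol ((matrix.length : Int) - 1) ((row0.length : Int) - 1)
    (PySem.List.pyRange 1 (num_neighbors + 1) 1)

-- ===== PRECONDITION & SPEC =====
-- Pre_ excludes (a) inputs where A raises IndexError: the empty matrix, and ragged matrices whose
-- row i-n is shorter than the column bound taken from row 0 at an accessed cell; and (b) num_neighbors < 0,
-- where A's False (a list length compared against a negative count) and B's vacuous True are both
-- defensible readings of an unspecified corner.
def Pre_antidiagonal_right_search (i : Int) (j : Int) (matrix : List (List Int)) (num_neighbors : Int) (symbol : Int) : Prop :=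
  matrix ≠ [] ∧ 0 ≤ num_neighbors ∧
  ∀ r : Fin matrix.length,
    (1 ≤ i - ((r : Nat) : Int) ∧ i - ((r : Nat) : Int) ≤ num_neighbors ∧
       0 ≤ j + (i - ((r : Nat) : Int)) ∧ j + (i - ((r : Nat) : Int)) ≤ (matrix.headI.length : Int) - 1) →
    j + (i - ((r : Nat) : Int)) < ((matrix.get r).length : Int)
instance (i : Int) (j : Int) (matrix : List (List Int)) (num_neighbors : Int) (symbol : Int) : Decidable (Pre_antidiagonal_right_search i j matrix num_neighbors symbol) := by unfold Pre_antidiagonal_right_search; infer_instance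

def pvWitness_antidiagonal_right_search : Int × Int × List (List Int) × Int × Int := (1, 0, [[7, 7], [0, 7]], 1, 7)

def Spec_antidiagonal_right_search (i : Int) (j : Int) (matrix : List (List Int)) (num_neighbors : Int) (symbol : Int) (out : Bool) : Prop := out = antidiagonal_right_search_alt i j matrix num_neighbors symbol
instance (i : Int) (j : Int) (matrix : List (List Int)) (num_neighbors : Int) (symbol : Int) (out : Bool) : Decidable (Spec_antidiagonal_right_search i j matrix num_neighbors symbol out) := by unfold Spec_antidiagonal_right_search; infer_instance

-- ===== CLAIM (what is proved, stated in full; the proofs are below) =====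
def Claim_equal_antidiagonal_right_search : Prop := ∀ (i : Int) (j : Int) (matrix : List (List Int)) (num_neighbors : Int) (symbol : Int), Dom_antidiagonal_right_search i j matrix num_neighbors symbol → Pre_antidiagonal_right_search i j matrix num_neighbors symbol → Spec_antidiagonal_right_search i j matrix num_neighbors symbol (antidiagonal_right_search i j matrix num_neighbors symbol)

-- ===== LEMMAS AND PROOFS =====

-- B's early-exit scan equals the pointwise conjunction over the range list
lemma pvAltGo_eq_all (i j : Int) (matrix : List (List Int)) (symbol max_i max_j : Int) (L : List Int) :
    pvAltGo i j matrix symbol max_i max_j L =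
      L.all (fun n =>
        decide (0 ≤ i - n ∧ 0 ≤ j + n ∧ i - n ≤ max_i ∧ j + n ≤ max_j) &&
        ((PySem.List.pyGet? ((PySem.List.pyGet? matrix (i - n)).getD []) (j + n)).getD 0 == symbol)) := by
  induction L with
  | nil => rfl
  | cons n rest ih =>
    simp only [pvAltGo, List.all_cons, ih]
    by_cases hb : i - n < 0 ∨ j + n < 0 ∨ max_i < i - n ∨ max_j < j + n
    · rw [if_pos hb]
      have hd : decide (0 ≤ i - n ∧ 0 ≤ j + n ∧ i - n ≤ max_i ∧ j + n ≤ max_j) = false :=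
        decide_eq_false (by omega)
      rw [hd, Bool.false_and, Bool.false_and]
    · rw [if_neg hb]
      have hd : decide (0 ≤ i - n ∧ 0 ≤ j + n ∧ i - n ≤ max_i ∧ j + n ≤ max_j) = true :=
        decide_eq_true (by omega)
      rw [hd, Bool.true_and]
      by_cases hv : (PySem.List.pyGet? ((PySem.List.pyGet? matrix (i - n)).getD []) (j + n)).getD 0 = symbol
      · rw [if_neg (fun h => h hv)]
        have hbeq : ((PySem.List.pyGet? ((PySem.List.pyGet? matrix (i - n)).getD []) (j + n)).getD 0 == symbol) = true :=
          beq_iff_eq.mpr hv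
        rw [hbeq, Bool.true_and]
      · rw [if_pos hv]
        have hbeq : ((PySem.List.pyGet? ((PySem.List.pyGet? matrix (i - n)).getD []) (j + n)).getD 0 == symbol) = false :=
          beq_eq_false_iff_ne.mpr hv
        rw [hbeq, Bool.false_and]

-- A's filtered-list / length-check / all() pipeline equals the same pointwise conjunction,
-- provided the range list has exactly num elements
lemma pvAllCongr (P : Int → Prop) [DecidablePred P] (val : Int → Int) (symbol : Int) :
    ∀ M : List Int, (∀ n ∈ M, P n) →
      M.all (fun n => val n == symbol) = M.all (fun n => decide (P n) && (val n == symbol)) := by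
  intro M
  induction M with
  | nil => intro _; rfl
  | cons n rest ih =>
    intro hM
    simp only [List.all_cons, decide_eq_true (hM n List.mem_cons_self), Bool.true_and]
    rw [ih (fun a ha => hM a (List.mem_cons_of_mem n ha))]

-- A's filtered-list / length-check / all() pipeline equals the same pointwise conjunction,
-- provided the range list has exactly num elements
lemma pvCore (P : Int → Prop) [DecidablePred P] (val : Int → Int) (symbol : Int) (L : List Int)
    (num : Int) (hlen : (L.length : Int) = num) :
    (if ((((L.filter (fun n => decide (P n))).map val).length : Int) ≠ num) then false
     else ((L.filter (fun n => decide (P n))).map val).all (fun item => item == symbol))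
    = L.all (fun n => decide (P n) && (val n == symbol)) := by
  by_cases hall : ∀ n ∈ L, P n
  · have hfil : L.filter (fun n => decide (P n)) = L :=
      List.filter_eq_self.mpr (fun a ha => decide_eq_true (hall a ha))
    rw [hfil, if_neg (by simp [hlen]), List.all_map]
    exact pvAllCongr P val symbol L hall
  · push Not at hall
    obtain ⟨n₀, hn₀L, hn₀P⟩ := hall
    have hlt : (L.filter (fun n => decide (P n))).length < L.length :=
      List.length_filter_lt_length_iff_exists.mpr ⟨n₀, hn₀L, by simp [hn₀P]⟩
    rw [if_pos (by simp only [List.length_map]; omega)]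
    symm
    rw [List.all_eq_false]
    exact ⟨n₀, hn₀L, by simp [decide_eq_false hn₀P]⟩

-- ===== VERDICT (by name: the statement is the Claim_ definition above) =====
theorem antidiagonal_right_search_spec : Claim_equal_antidiagonal_right_search := by
  intro i j matrix num_neighbors symbol _hdom hpre
  obtain ⟨hne, hnn, _hsafe⟩ := hpre
  unfold Spec_antidiagonal_right_search antidiagonal_right_search antidiagonal_right_search_alt
  simp only [ne_eq]
  rw [pvAltGo_eq_all]
  rw [PySem.List.foldl_append_ite
    (p := fun n => 0 ≤ i - n ∧ 0 ≤ j + n ∧ i - n ≤ (matrix.length : Int) - 1 ∧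
      j + n ≤ ((((PySem.List.pyGet? matrix 0).getD []).length : Int) - 1))
    (f := fun n => (PySem.List.pyGet? ((PySem.List.pyGet? matrix (i - n)).getD []) (j + n)).getD 0)]
  rw [List.nil_append]
  exact pvCore _ _ _ _ _ (by rw [PySem.List.length_pyRange_one]; omega)
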